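-- pv_equiv track=rewrite | github.com/MARIYAPPANS/Daily-Leetcode | Medium_Problems/2337-Move-Pieces-to-Obtain-a-String.py | canChange
-- ===== SOURCE A (Python) =====
-- def canChange(start: str, target: str) -> bool:
--     # Filter out the underscores and check if L and R are in the same order
--     if start.replace('_', '') != target.replace('_', ''):
--         return False
--
--     # Check the positions of 'L' in start and target
--     j = 0
--     for i, c in enumerate(start):
--         if c == 'L':
--             while target[j] != 'L':
--                 j += 1
--             if i < j:  # 'L' can only move left
--                 return False
--             j += 1
--
--     # Check the positions of 'R' in start and target
--     j = 0
--     for i, c in enumerate(start):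
--         if c == 'R':
--             while target[j] != 'R':
--                 j += 1
--             if i > j:  # 'R' can only move right
--                 return False
--             j += 1
--
--     return True
-- ===== SOURCE B (Python) =====
-- def canChange(start: str, target: str) -> bool:
--     # Single simultaneous two-pointer scan instead of replace()-comparison plus two L/R passes.
--     n, m = len(start), len(target)
--     i = j = 0
--     while True:
--         while i < n and start[i] == '_':
--             i += 1
--         while j < m and target[j] == '_':
--             j += 1
--         if i == n or j == m:
--             return i == n and j == m
--         a = start[i]
--         if a != target[j]:
--             return False
--         if a == 'L' and i < j:
--             return False
--         if a == 'R' and i > j: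
--             return False
--         i += 1
--         j += 1
-- ===== Notes on version B (the rewrite author's own statement) =====
-- stated objective: simpler
-- what changed: Replaced A's replace()-based filtered-string comparison plus two separate indexed L/R passes (each with an inner while scan) by a single simultaneous two-pointer scan that skips underscores on both sides and checks character equality and the L/R movement constraints in one loop.
import Mathlib
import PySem

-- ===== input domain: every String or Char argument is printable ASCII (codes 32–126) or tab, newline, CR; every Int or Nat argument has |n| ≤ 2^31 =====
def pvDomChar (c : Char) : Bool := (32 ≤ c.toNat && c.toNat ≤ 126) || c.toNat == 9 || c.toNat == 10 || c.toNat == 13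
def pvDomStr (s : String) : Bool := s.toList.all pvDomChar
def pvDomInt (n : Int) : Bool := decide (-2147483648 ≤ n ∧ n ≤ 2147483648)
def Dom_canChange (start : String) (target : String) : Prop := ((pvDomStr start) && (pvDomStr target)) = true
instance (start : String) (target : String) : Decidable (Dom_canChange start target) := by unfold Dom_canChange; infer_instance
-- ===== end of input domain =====

-- B replaces A's three passes (replace()-comparison + two indexed L/R loops) by one
-- simultaneous two-pointer scan; same return value everywhere (objective: simpler).

-- ===== PORT A =====
-- port of the inner `while target[j] != c: j += 1` (returns ts.length if it runs
-- off the end — unreachable in canChange because the replace-equality guard holds there)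
def pvFindIdx (ts : List Char) (c : Char) (j : Nat) : Nat :=
  if h : j < ts.length then
    if ts[j] = c then j else pvFindIdx ts c (j + 1)
  else ts.length
termination_by ts.length - j

-- port of A's two identical `for i, c in enumerate(start)` loops (the loop body is the
-- same up to the tracked char c and the comparison `bad`, used with 'L'/(i<j) and 'R'/(i>j))
def pvLoop (ts : List Char) (c : Char) (bad : Nat → Nat → Bool) : List Char → Nat → Nat → Bool
  | [], _, _ => true
  | x :: cs, i, j =>
    if x = c then
      let j' := pvFindIdx ts c j
      if bad i j' then false else pvLoop ts c bad cs (i + 1) (j' + 1)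
    else pvLoop ts c bad cs (i + 1) j

def canChange (start : String) (target : String) : Bool :=
  if PySem.Str.replace start "_" "" ≠ PySem.Str.replace target "_" "" then false
  else
    pvLoop target.toList 'L' (fun i j => decide (i < j)) start.toList 0 0 &&
    pvLoop target.toList 'R' (fun i j => decide (j < i)) start.toList 0 0

-- ===== PORT B =====
-- one simultaneous two-pointer scan (i, j are the current absolute positions)
def pvScan (i j : Nat) (s t : List Char) : Bool :=
  match s, t with
  | '_' :: s', t => pvScan (i + 1) j s' t
  | s, '_' :: t' => pvScan i (j + 1) s t'
  | [], [] => true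
  | a :: s', b :: t' =>
      if a != b then false
      else if a == 'L' && decide (i < j) then false
      else if a == 'R' && decide (j < i) then false
      else pvScan (i + 1) (j + 1) s' t'
  | _, _ => false
termination_by s.length + t.length

def canChange_alt (start : String) (target : String) : Bool :=
  pvScan 0 0 start.toList target.toList

-- ===== PRECONDITION & SPEC =====
def Spec_canChange (start : String) (target : String) (out : Bool) : Prop := out = canChange_alt start target
instance (start : String) (target : String) (out : Bool) : Decidable (Spec_canChange start target out) := by unfold Spec_canChange; infer_instance

-- ===== CLAIM (what is proved, stated in full; the proofs are below) =====
def Claim_equal_canChange : Prop := ∀ (start : String) (target : String), Dom_canChange start target → Spec_canChange start target (canChange start target)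

-- ===== LEMMAS AND PROOFS =====

-- positions (absolute, starting at offset i) of the char c in a list
def pvOcc (c : Char) (i : Nat) : List Char → List Nat
  | [] => []
  | x :: xs => if x = c then i :: pvOcc c (i + 1) xs else pvOcc c (i + 1) xs

-- the non-underscore characters of a list, with their absolute positions (offset i)
def pvPairs (i : Nat) : List Char → List (Nat × Char)
  | [] => []
  | x :: xs => if x = '_' then pvPairs (i + 1) xs else (i, x) :: pvPairs (i + 1) xs

-- middle predicate: pvScan on the position/char pair lists
def pvM : List (Nat × Char) → List (Nat × Char) → Bool
  | [], [] => true
  | (i, a) :: ps, (j, b) :: pt =>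
      (a == b) && !(a == 'L' && decide (i < j)) && !(a == 'R' && decide (j < i)) && pvM ps pt
  | _, _ => false

def pvIdxs (c : Char) (ps : List (Nat × Char)) : List Nat :=
  (ps.filter (fun p => p.2 == c)).map Prod.fst

theorem pvIdxs_cons (c a : Char) (i : Nat) (ps : List (Nat × Char)) :
    pvIdxs c ((i, a) :: ps) = if a = c then i :: pvIdxs c ps else pvIdxs c ps := by
  by_cases h : a = c <;> simp [pvIdxs, h]

theorem pvScan_eq_pvM (s t : List Char) (i j : Nat) :
    pvScan i j s t = pvM (pvPairs i s) (pvPairs j t) := by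
  fun_induction pvScan i j s t
  case case7 => simp_all [pvPairs, pvM]; tauto
  case case8 =>
    rename_i i j s t h1 h2 h3 h4
    cases s with
    | nil =>
      cases t with
      | nil => exact absurd rfl (h3 rfl)
      | cons b t' =>
        have hb : b ≠ '_' := fun hbe => h2 t' (by rw [hbe])
        simp [pvPairs, pvM, hb]
    | cons a s' =>
      cases t with
      | nil =>
        have ha : a ≠ '_' := fun hae => h1 s' (by rw [hae])
        simp [pvPairs, pvM, ha]
      | cons b t' => exact (h4 _ _ _ _ rfl rfl).elim
  all_goals simp_all [pvPairs, pvM]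

theorem pvM_false {ps pt : List (Nat × Char)}
    (h : ps.map Prod.snd ≠ pt.map Prod.snd) : pvM ps pt = false := by
  induction ps generalizing pt with
  | nil => cases pt with
    | nil => simp at h
    | cons q qt => cases q; simp [pvM]
  | cons p ps ih =>
    cases pt with
    | nil => cases p; simp [pvM]
    | cons q qt =>
      cases p with | mk i a =>
      cases q with | mk j b =>
      by_cases hab : a = b
      · subst hab
        have : ps.map Prod.snd ≠ qt.map Prod.snd := by simpa using h
        simp [pvM, ih this]
      · simp [pvM, hab]

theorem pvM_decomp {ps pt : List (Nat × Char)}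
    (h : ps.map Prod.snd = pt.map Prod.snd) :
    pvM ps pt =
      (((pvIdxs 'L' ps).zip (pvIdxs 'L' pt)).all (fun p => !decide (p.1 < p.2)) &&
       ((pvIdxs 'R' ps).zip (pvIdxs 'R' pt)).all (fun p => !decide (p.2 < p.1))) := by
  induction ps generalizing pt with
  | nil =>
    cases pt with
    | nil => simp [pvM, pvIdxs]
    | cons q qt => simp at h
  | cons p ps ih =>
    cases pt with
    | nil => simp at h
    | cons q qt =>
      cases p with | mk i a =>
      cases q with | mk j b =>
      obtain ⟨hab, htl⟩ : a = b ∧ ps.map Prod.snd = qt.map Prod.snd := by simpa using h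
      subst hab
      by_cases hL : a = 'L'
      · subst hL
        simp [pvM, pvIdxs_cons, ih htl, Bool.and_assoc]
      · by_cases hR : a = 'R'
        · subst hR
          simp [pvM, pvIdxs_cons, ih htl, Bool.and_left_comm]
        · simp [pvM, pvIdxs_cons, hL, hR, ih htl]

theorem pvIdxs_length_eq {ps pt : List (Nat × Char)}
    (h : ps.map Prod.snd = pt.map Prod.snd) (c : Char) :
    (pvIdxs c ps).length = (pvIdxs c pt).length := by
  induction ps generalizing pt with
  | nil => cases pt with
    | nil => rfl
    | cons q qt => simp at h
  | cons p ps ih =>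
    cases pt with
    | nil => simp at h
    | cons q qt =>
      cases p with | mk i a =>
      cases q with | mk j b =>
      obtain ⟨hab, htl⟩ : a = b ∧ ps.map Prod.snd = qt.map Prod.snd := by simpa using h
      subst hab
      by_cases hc : a = c <;> simp [pvIdxs_cons, hc, ih htl]

theorem pvIdxs_pairs (c : Char) (hc : c ≠ '_') (s : List Char) (i : Nat) :
    pvIdxs c (pvPairs i s) = pvOcc c i s := by
  induction s generalizing i with
  | nil => simp [pvPairs, pvOcc, pvIdxs]
  | cons x xs ih =>
    by_cases hx : x = '_'
    · subst hx
      simp [pvPairs, pvOcc, Ne.symm hc, ih]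
    · by_cases hxc : x = c
      · subst hxc
        simp [pvPairs, pvOcc, hx, pvIdxs_cons, ih]
      · simp [pvPairs, pvOcc, hx, hxc, pvIdxs_cons, ih]

theorem map_snd_pairs (s : List Char) (i : Nat) :
    (pvPairs i s).map Prod.snd = s.filter (fun x => x != '_') := by
  induction s generalizing i with
  | nil => simp [pvPairs]
  | cons x xs ih =>
    by_cases hx : x = '_'
    · subst hx; simp [pvPairs, ih]
    · simp [pvPairs, hx, ih]

theorem pvFindIdx_spec (ts : List Char) (c : Char) (j : Nat) :
    pvFindIdx ts c j = (pvOcc c j (ts.drop j)).headD ts.length := by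
  fun_induction pvFindIdx ts c j with
  | case1 j h heq =>
      rw [List.drop_eq_getElem_cons h]
      simp [pvOcc, heq]
  | case2 j h hne ih =>
      rw [List.drop_eq_getElem_cons h]
      simp [pvOcc, hne, ih]
  | case3 j h =>
      have : ts.drop j = [] := List.drop_eq_nil_of_le (by omega)
      simp [this, pvOcc]

theorem pvOcc_drop_tail (ts : List Char) (c : Char) :
    ∀ (n j : Nat), ts.length - j = n → ∀ p rest, pvOcc c j (ts.drop j) = p :: rest →
      rest = pvOcc c (p + 1) (ts.drop (p + 1)) := by
  intro n
  induction n with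
  | zero =>
    intro j hj p rest hocc
    have : ts.drop j = [] := List.drop_eq_nil_of_le (by omega)
    simp [this, pvOcc] at hocc
  | succ n ih =>
    intro j hj p rest hocc
    have hjl : j < ts.length := by
      by_contra hge
      have : ts.drop j = [] := List.drop_eq_nil_of_le (by omega)
      simp [this, pvOcc] at hocc
    rw [List.drop_eq_getElem_cons hjl] at hocc
    by_cases hc : ts[j] = c
    · simp [pvOcc, hc] at hocc
      obtain ⟨hp, hr⟩ := hocc
      subst hp; exact hr.symm
    · simp [pvOcc, hc] at hocc
      exact ih (j + 1) (by omega) p rest hocc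

theorem pvLoop_spec (ts : List Char) (c : Char) (bad : Nat → Nat → Bool) :
    ∀ (cs : List Char) (i j : Nat),
      (pvOcc c i cs).length ≤ (pvOcc c j (ts.drop j)).length →
      pvLoop ts c bad cs i j =
        ((pvOcc c i cs).zip (pvOcc c j (ts.drop j))).all (fun p => !bad p.1 p.2) := by
  intro cs
  induction cs with
  | nil => intro i j _; simp [pvLoop, pvOcc]
  | cons x cs ih =>
    intro i j hlen
    by_cases hx : x = c
    · subst hx
      rw [show pvOcc x i (x :: cs) = i :: pvOcc x (i + 1) cs from by simp [pvOcc]] at hlen ⊢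
      obtain ⟨p, rest, hocc⟩ : ∃ p rest, pvOcc x j (ts.drop j) = p :: rest := by
        cases h : pvOcc x j (ts.drop j) with
        | nil => rw [h] at hlen; simp at hlen
        | cons p rest => exact ⟨p, rest, rfl⟩
      have hp : pvFindIdx ts x j = p := by rw [pvFindIdx_spec, hocc]; rfl
      have hrest : rest = pvOcc x (p + 1) (ts.drop (p + 1)) :=
        pvOcc_drop_tail ts x (ts.length - j) j rfl p rest hocc
      rw [hocc] at hlen ⊢
      simp only [pvLoop, hp]
      cases hbad : bad i p with
      | true => simp [hbad]
      | false =>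
        have hlen' : (pvOcc x (i + 1) cs).length ≤ (pvOcc x (p + 1) (ts.drop (p + 1))).length := by
          rw [← hrest]; simpa using hlen
        rw [ih (i + 1) (p + 1) hlen', ← hrest]
        simp [hbad]
    · rw [show pvOcc c i (x :: cs) = pvOcc c (i + 1) cs from by simp [pvOcc, hx]] at hlen ⊢
      rw [show pvLoop ts c bad (x :: cs) i j = pvLoop ts c bad cs (i + 1) j from by
        simp [pvLoop, hx]]
      exact ih (i + 1) j hlen

theorem pvReplace_go (fuel : Nat) (l acc : List Char) (h : l.length ≤ fuel) :
    PySem.Chars.replace.go ['_'] [] fuel l acc = acc.reverse ++ l.filter (fun x => x != '_') := by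
  induction fuel generalizing l acc with
  | zero =>
    have : l = [] := List.eq_nil_of_length_eq_zero (by omega)
    subst this
    simp [PySem.Chars.replace.go]
  | succ fuel ih =>
    cases l with
    | nil => simp [PySem.Chars.replace.go]
    | cons x xs =>
      by_cases hx : x = '_'
      · subst hx
        have hpre : List.isPrefixOf ['_'] ('_' :: xs) = true := by
          simp [List.isPrefixOf]
        simp only [PySem.Chars.replace.go, hpre, if_pos]
        rw [ih _ _ (by simpa using Nat.le_of_succ_le_succ h)]
        simp
      · have hpre : List.isPrefixOf ['_'] (x :: xs) = false := by
          simp [List.isPrefixOf]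
          exact fun h => hx h.symm
        simp only [PySem.Chars.replace.go, hpre]
        rw [show (if (false = true) then PySem.Chars.replace.go ['_'] [] fuel (List.drop ['_'].length (x :: xs)) ([].reverse ++ acc) else PySem.Chars.replace.go ['_'] [] fuel xs (x :: acc)) = PySem.Chars.replace.go ['_'] [] fuel xs (x :: acc) from by simp]
        rw [ih xs (x :: acc) (by simpa using Nat.le_of_succ_le_succ h)]
        simp [hx]

theorem pvReplace_eq (s : String) :
    (PySem.Str.replace s "_" "").toList = s.toList.filter (fun x => x != '_') := by
  rw [PySem.Str.toList_replace]
  have : ("_" : String).toList = ['_'] := rfl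
  rw [this]
  have : ("" : String).toList = [] := rfl
  rw [this]
  rw [show PySem.Chars.replace s.toList ['_'] [] =
      PySem.Chars.replace.go ['_'] [] s.toList.length s.toList [] from by
    simp [PySem.Chars.replace]]
  simpa using pvReplace_go s.toList.length s.toList [] le_rfl

theorem canChange_eq_alt (start target : String) :
    canChange start target = canChange_alt start target := by
  unfold canChange canChange_alt
  rw [pvScan_eq_pvM]
  by_cases heq : PySem.Str.replace start "_" "" = PySem.Str.replace target "_" ""
  · have hfil : start.toList.filter (fun x => x != '_') = target.toList.filter (fun x => x != '_') := by
      rw [← pvReplace_eq, ← pvReplace_eq, heq]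
    have hmap : (pvPairs 0 start.toList).map Prod.snd = (pvPairs 0 target.toList).map Prod.snd := by
      rw [map_snd_pairs, map_snd_pairs, hfil]
    rw [if_neg (by simpa using heq)]
    rw [pvM_decomp hmap]
    have hL := pvIdxs_length_eq hmap 'L'
    have hR := pvIdxs_length_eq hmap 'R'
    rw [pvIdxs_pairs 'L' (by decide), pvIdxs_pairs 'L' (by decide)] at hL ⊢
    rw [pvIdxs_pairs 'R' (by decide), pvIdxs_pairs 'R' (by decide)] at hR ⊢
    rw [pvLoop_spec target.toList 'L' _ start.toList 0 0 (by simpa using hL.le)]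
    rw [pvLoop_spec target.toList 'R' _ start.toList 0 0 (by simpa using hR.le)]
    simp
  · have hfil : start.toList.filter (fun x => x != '_') ≠ target.toList.filter (fun x => x != '_') := by
      intro hc
      exact heq (String.toList_injective (by rw [pvReplace_eq, pvReplace_eq, hc]))
    have hmap : (pvPairs 0 start.toList).map Prod.snd ≠ (pvPairs 0 target.toList).map Prod.snd := by
      rw [map_snd_pairs, map_snd_pairs]; exact hfil
    rw [if_pos (by simpa using heq), pvM_false hmap]

-- ===== VERDICT (by name: the statement is the Claim_ definition above) =====
theorem canChange_spec : Claim_equal_canChange := by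
  intro start target _
  unfold Spec_canChange
  exact canChange_eq_alt start target
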